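-- pv_equiv track=rewrite | github.com/BruceEckel/MemorizeScript | MemorizeScript.py | compress_word
-- ===== SOURCE A (Python) =====
-- def compress_word(word):
--     result = ""
--     word = word.strip()
--     if '-' in word:
--         for phrase in word.split('-'):
--             result += compress(phrase) + '-'
--         return result[:-1]
--     return compress(word)
--
-- def compress(phrase):
--     found_first_char = False
--     result = ""
--     for char in phrase:
--         if char.isalnum():
--             if not found_first_char:
--                 result += char
--                 found_first_char = True
--         else:
--             if char not in "'":
--                 result += char # Retain punctuation
--     return result
-- ===== SOURCE B (Python) =====
-- def compress_word(word):
--     result = []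
--     found_first = False
--     for char in word.strip():
--         if char == '-':
--             result.append('-')
--             found_first = False
--         elif char.isalnum():
--             if not found_first:
--                 result.append(char)
--                 found_first = True
--         elif char != "'":
--             result.append(char)
--     return ''.join(result)
-- ===== Notes on version B (the rewrite author's own statement) =====
-- stated objective: simpler
-- what changed: Replaces A's split-on-hyphen / compress-each-phrase helper / join-and-trim-trailing-hyphen decomposition with a single pass over the stripped word that keeps a found-first flag reset at every hyphen, emitting hyphens inline.
import Mathlib
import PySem

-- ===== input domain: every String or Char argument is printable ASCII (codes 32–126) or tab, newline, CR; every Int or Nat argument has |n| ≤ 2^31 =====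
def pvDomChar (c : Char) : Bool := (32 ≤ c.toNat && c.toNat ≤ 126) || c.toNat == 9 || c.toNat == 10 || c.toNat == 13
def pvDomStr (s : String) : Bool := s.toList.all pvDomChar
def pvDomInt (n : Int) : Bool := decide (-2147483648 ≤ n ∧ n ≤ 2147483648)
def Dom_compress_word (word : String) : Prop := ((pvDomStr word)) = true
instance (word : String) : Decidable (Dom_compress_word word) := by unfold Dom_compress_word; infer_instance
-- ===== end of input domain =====

-- B replaces A's split('-')/compress-each/join-and-trim decomposition by a single pass over the
-- stripped word with a per-phrase found-first flag reset at each hyphen (objective: simpler).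

-- ===== PORT A =====
-- helper 'compress' of A: fold over the phrase with state (found_first_char, result)
def pvCompress (phrase : List Char) : List Char :=
  (phrase.foldl (fun (st : Bool × List Char) c =>
      if PySem.Chars.isalnum c then
        if st.1 = false then (true, st.2 ++ [c]) else st
      else
        if c ≠ '\'' then (st.1, st.2 ++ [c]) else st)
    (false, ([] : List Char))).2

def compress_word (word : String) : String :=
  let w := PySem.Chars.strip word.toList
  if PySem.Chars.isIn ['-'] w then
    String.ofList (PySem.List.slice
      ((PySem.Chars.splitOn w ['-']).foldl
        (fun (acc : List Char) ph => acc ++ (pvCompress ph ++ ['-'])) [])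
      none (some (-1)))
  else
    String.ofList (pvCompress w)

-- ===== PORT B =====
def compress_word_alt (word : String) : String :=
  String.ofList
    (((PySem.Chars.strip word.toList).foldl (fun (st : Bool × List Char) c =>
        if c = '-' then (false, st.2 ++ ['-'])
        else if PySem.Chars.isalnum c then
          (if st.1 = false then (true, st.2 ++ [c]) else st)
        else if c ≠ '\'' then (st.1, st.2 ++ [c]) else st)
      (false, ([] : List Char))).2)

-- ===== PRECONDITION & SPEC =====
def Spec_compress_word (word : String) (out : String) : Prop := out = compress_word_alt word
instance (word : String) (out : String) : Decidable (Spec_compress_word word out) := by unfold Spec_compress_word; infer_instance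

-- ===== CLAIM (what is proved, stated in full; the proofs are below) =====
def Claim_equal_compress_word : Prop := ∀ (word : String), Dom_compress_word word → Spec_compress_word word (compress_word word)

-- ===== LEMMAS AND PROOFS =====

-- recursive form of A's helper 'compress' (state-passing version of the fold in pvCompress)
def cgo : Bool → List Char → Bool × List Char
  | b, [] => (b, [])
  | b, c :: cs =>
    if PySem.Chars.isalnum c then
      if b = false then ((cgo true cs).1, c :: (cgo true cs).2)
      else cgo b cs
    else if c ≠ '\'' then ((cgo b cs).1, c :: (cgo b cs).2)
    else cgo b cs

-- recursive form of B's single loop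
def bgo : Bool → List Char → Bool × List Char
  | _, [] => (false, [])  -- final flag unused; normalised
  | b, c :: cs =>
    if c = '-' then ((bgo false cs).1, '-' :: (bgo false cs).2)
    else if PySem.Chars.isalnum c then
      if b = false then ((bgo true cs).1, c :: (bgo true cs).2)
      else bgo b cs
    else if c ≠ '\'' then ((bgo b cs).1, c :: (bgo b cs).2)
    else bgo b cs

-- what B computes on a split-up word: first phrase with flag b, the rest each after a '-'
def pvJoin (b : Bool) : List (List Char) → List Char
  | [] => []
  | p :: qs => (cgo b p).2 ++ qs.flatMap (fun q => '-' :: (cgo false q).2)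

lemma cfold (cs : List Char) : ∀ (b : Bool) (acc : List Char),
    cs.foldl (fun (st : Bool × List Char) c =>
      if PySem.Chars.isalnum c then
        if st.1 = false then (true, st.2 ++ [c]) else st
      else
        if c ≠ '\'' then (st.1, st.2 ++ [c]) else st) (b, acc)
    = ((cgo b cs).1, acc ++ (cgo b cs).2) := by
  induction cs with
  | nil => intro b acc; simp [cgo]
  | cons c cs ih =>
    intro b acc
    simp only [List.foldl_cons]
    split_ifs with h1 h2 h3 <;> rw [ih] <;> simp_all [cgo]
lemma bfold (cs : List Char) : ∀ (b : Bool) (acc : List Char),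
    (cs.foldl (fun (st : Bool × List Char) c =>
        if c = '-' then (false, st.2 ++ ['-'])
        else if PySem.Chars.isalnum c then
          (if st.1 = false then (true, st.2 ++ [c]) else st)
        else if c ≠ '\'' then (st.1, st.2 ++ [c]) else st) (b, acc)).2
    = acc ++ (bgo b cs).2 := by
  induction cs with
  | nil => intro b acc; simp [bgo]
  | cons c cs ih =>
    intro b acc
    simp only [List.foldl_cons]
    split_ifs with h1 h2 h3 h4 <;> rw [ih] <;> simp_all [bgo]

-- the fuel-driven splitter of PySem agrees with List.splitOnP for the one-char separator '-'
lemma go_eq : ∀ (fuel : Nat) (l cur : List Char) (acc : List (List Char)), l.length < fuel →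
    PySem.Chars.splitOn.go ['-'] fuel l cur acc
    = acc.reverse ++ (List.splitOnP (· == '-') l).modifyHead (fun t => cur.reverse ++ t) := by
  intro fuel
  induction fuel with
  | zero => intro l cur acc h; omega
  | succ fuel ih =>
    intro l cur acc h
    match l with
    | [] => simp [PySem.Chars.splitOn.go, List.splitOnP_nil]
    | c :: rest =>
      simp only [PySem.Chars.splitOn.go, List.splitOnP_cons]
      by_cases hc : c = '-'
      · subst hc
        simp only [List.isPrefixOf, beq_self_eq_true, Bool.true_and, if_pos,
          List.length_cons, List.length_nil, List.drop_succ_cons, List.drop_zero]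
        rw [ih rest [] ((cur.reverse) :: acc) (by simp at h; omega)]
        obtain ⟨p, qs, hpq⟩ := List.exists_cons_of_ne_nil (List.splitOnP_ne_nil (· == '-') rest)
        simp [hpq, List.modifyHead]
      · have : (['-'].isPrefixOf (c :: rest)) = false := by
          simp [List.isPrefixOf]; exact fun h' => absurd h'.symm hc
        rw [this]
        simp only [Bool.false_eq_true, if_false]
        rw [ih rest (c :: cur) acc (by simp at h; omega)]
        obtain ⟨p, qs, hpq⟩ := List.exists_cons_of_ne_nil (List.splitOnP_ne_nil (· == '-') rest)
        simp [hc, hpq, List.modifyHead]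

lemma splitOn_eq (w : List Char) :
    PySem.Chars.splitOn w ['-'] = List.splitOnP (· == '-') w := by
  rw [PySem.Chars.splitOn, go_eq (w.length + 1) w [] [] (by omega)]
  obtain ⟨p, qs, hpq⟩ := List.exists_cons_of_ne_nil (List.splitOnP_ne_nil (· == '-') w)
  simp [hpq, List.modifyHead]

-- B's loop computes exactly the per-phrase compression glued with hyphens
lemma bgo_eq_join : ∀ (cs : List Char) (b : Bool),
    (bgo b cs).2 = pvJoin b (List.splitOnP (· == '-') cs) := by
  intro cs
  induction cs with
  | nil => intro b; simp [bgo, List.splitOnP_nil, pvJoin, cgo]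
  | cons c cs ih =>
    intro b
    obtain ⟨p, qs, hpq⟩ := List.exists_cons_of_ne_nil (List.splitOnP_ne_nil (· == '-') cs)
    by_cases hc : c = '-'
    · subst hc
      simp only [bgo, List.splitOnP_cons, beq_self_eq_true, if_pos]
      simp [pvJoin, ih false, hpq, cgo]
    · have hsplit : List.splitOnP (· == '-') (c :: cs) = (c :: p) :: qs := by
        simp [List.splitOnP_cons, hc, hpq, List.modifyHead]
      rw [hsplit]
      simp only [bgo, if_neg hc, pvJoin, cgo]
      split_ifs with h1 h2 h3 <;> rw [ih] <;> simp [pvJoin, hpq]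

-- A's join-then-trim equals the same glued form
lemma dropLast_flat : ∀ (qs : List (List Char)) (p : List Char),
    ((p :: qs).flatMap (fun ph => (cgo false ph).2 ++ ['-'])).dropLast
    = pvJoin false (p :: qs) := by
  intro qs
  induction qs with
  | nil => intro p; simp [pvJoin]
  | cons q qs ih =>
    intro p
    have hne : ((q :: qs).flatMap (fun ph => (cgo false ph).2 ++ ['-'])) ≠ [] := by
      simp [List.flatMap_cons]
    calc ((p :: q :: qs).flatMap (fun ph => (cgo false ph).2 ++ ['-'])).dropLast
        = (((cgo false p).2 ++ ['-']) ++ (q :: qs).flatMap (fun ph => (cgo false ph).2 ++ ['-'])).dropLast := by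
          simp [List.flatMap_cons]
      _ = ((cgo false p).2 ++ ['-']) ++ ((q :: qs).flatMap (fun ph => (cgo false ph).2 ++ ['-'])).dropLast :=
          List.dropLast_append_of_ne_nil hne
      _ = pvJoin false (p :: q :: qs) := by
          rw [ih q]; simp [pvJoin, List.flatMap_cons]

-- ===== VERDICT (by name: the statement is the Claim_ definition above) =====
theorem compress_word_spec : Claim_equal_compress_word := by
  intro word _
  unfold Spec_compress_word compress_word compress_word_alt
  set w := PySem.Chars.strip word.toList with hw
  rw [bfold]
  by_cases hin : PySem.Chars.isIn ['-'] w = true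
  · simp only [hin, if_pos, List.nil_append]
    rw [splitOn_eq, PySem.List.foldl_append_eq_flatMap (fun ph => pvCompress ph ++ ['-']),
      PySem.List.slice_to_neg_one, List.nil_append]
    obtain ⟨p, qs, hpq⟩ := List.exists_cons_of_ne_nil (List.splitOnP_ne_nil (· == '-') w)
    have hcomp : ∀ ph, pvCompress ph = (cgo false ph).2 := by
      intro ph; unfold pvCompress; rw [cfold]; simp
    simp only [hpq, funext hcomp]
    rw [dropLast_flat, bgo_eq_join w false, hpq]
  · simp only [hin, Bool.false_eq_true, if_false, List.nil_append]
    have hmem : '-' ∉ w := by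
      intro hm
      obtain ⟨l, r, hlr⟩ := List.append_of_mem hm
      have hinf : ['-'] <:+: w := by rw [hlr]; exact ⟨l, r, by simp⟩
      exact absurd ((PySem.Chars.isIn_iff_infix _ _).2 hinf) (by simp [hin])
    rw [bgo_eq_join w false, List.splitOnP_eq_single _ _ (by
      intro x hx; simp only [beq_iff_eq]; exact fun hxe => hmem (hxe ▸ hx))]
    unfold pvCompress
    rw [cfold]
    simp [pvJoin]
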